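-- pv_equiv track=rewrite | github.com/VRn00b/Plutus | hashIterator.py | iterateHash
-- ===== SOURCE A (Python) =====
-- def iterateHash(bytearray, index, delta):
-- 	carry = 0
-- 	newValue = bytearray[index] + delta
--
-- 	if newValue > 255:
-- 		carry = 1
-- 		newValue %= 256
-- 	elif newValue < 0:
-- 		carry = -1
-- 		newValue = 256 + newValue
--
-- 	bytearray[index] = newValue
--
-- 	if carry != 0 and index > 0:
-- 		iterateHash(bytearray, index - 1, carry)
--
-- 	return bytearray
-- ===== SOURCE B (Python) =====
-- def _step(value, amount):
--     newValue = value + amount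
--     if newValue > 255:
--         return 1, newValue % 256
--     if newValue < 0:
--         return -1, newValue + 256
--     return 0, newValue
--
-- def iterateHash(bytearray, index, delta):
--     i, amount = index, delta
--     while True:
--         carry, bytearray[i] = _step(bytearray[i], amount)
--         if carry == 0 or i <= 0:
--             return bytearray
--         i -= 1
--         amount = carry
-- ===== Notes on version B (the rewrite author's own statement) =====
-- stated objective: alternative
-- what changed: Replaced A's tail recursion by an explicit while loop over (index, amount) state with the single-byte update factored into a helper returning (carry, newValue).
-- outside the precondition, e.g. on iterateHash([1, 2], 5, 1): A raises IndexError, B raises IndexError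
import Mathlib
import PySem

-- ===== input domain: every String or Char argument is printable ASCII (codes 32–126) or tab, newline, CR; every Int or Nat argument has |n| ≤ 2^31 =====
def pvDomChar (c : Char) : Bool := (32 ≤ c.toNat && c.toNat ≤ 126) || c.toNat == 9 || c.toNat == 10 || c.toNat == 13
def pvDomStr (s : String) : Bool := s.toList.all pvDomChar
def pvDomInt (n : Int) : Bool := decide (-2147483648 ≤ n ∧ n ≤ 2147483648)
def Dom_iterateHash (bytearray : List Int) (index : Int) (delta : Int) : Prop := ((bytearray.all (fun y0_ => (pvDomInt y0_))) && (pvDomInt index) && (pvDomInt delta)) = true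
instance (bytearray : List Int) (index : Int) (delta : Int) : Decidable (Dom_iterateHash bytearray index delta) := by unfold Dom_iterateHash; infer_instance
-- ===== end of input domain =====

-- B replaces A's tail recursion by an explicit loop over (position, amount) state with the
-- byte-update step factored into a helper (objective: alternative decomposition, same cost).
-- A mutates its list argument in place; the equivalence proved here is about the RETURN value only.

-- ===== PORT A =====
-- literal transliteration of A; the recursive call happens only under carry ≠ 0 ∧ index > 0
def iterateHash (bytearray : List Int) (index : Int) (delta : Int) : List Int :=
  match PySem.List.pyGet? bytearray index with
  | none => bytearray   -- IndexError in Python; excluded by Pre_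
  | some v =>
    let newValue := v + delta
    let carry : Int := if newValue > 255 then 1 else if newValue < 0 then -1 else 0
    let newValue := if newValue > 255 then PySem.Int.mod newValue 256
                    else if newValue < 0 then 256 + newValue else newValue
    let ba := PySem.List.pySetD bytearray index newValue
    if h : carry ≠ 0 ∧ index > 0 then iterateHash ba (index - 1) carry else ba
termination_by index.toNat
decreasing_by omega

-- ===== PORT B =====
-- B's helper _step: one byte update, returns (carry, new byte value)
def iterStep (value : Int) (amount : Int) : Int × Int :=
  let newValue := value + amount
  if newValue > 255 then (1, PySem.Int.mod newValue 256)
  else if newValue < 0 then (-1, newValue + 256)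
  else (0, newValue)

-- B's while-loop over the state (bytearray, i, amount)
def iterLoop (bytearray : List Int) (i : Int) (amount : Int) : List Int :=
  match PySem.List.pyGet? bytearray i with
  | none => bytearray   -- IndexError in Python; excluded by Pre_
  | some v =>
    let r := iterStep v amount
    let ba := PySem.List.pySetD bytearray i r.2
    if h : r.1 = 0 ∨ i ≤ 0 then ba else iterLoop ba (i - 1) r.1
termination_by i.toNat
decreasing_by omega

def iterateHash_alt (bytearray : List Int) (index : Int) (delta : Int) : List Int :=
  iterLoop bytearray index delta

-- ===== PRECONDITION & SPEC =====
-- Pre_ excludes exactly the inputs where Python A raises IndexError: index out of range.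
def Pre_iterateHash (bytearray : List Int) (index : Int) (delta : Int) : Prop :=
  PySem.Raise.InRange bytearray.length index
instance (bytearray : List Int) (index : Int) (delta : Int) : Decidable (Pre_iterateHash bytearray index delta) := by unfold Pre_iterateHash; infer_instance

def pvWitness_iterateHash : List Int × Int × Int := ([10, 255], 1, 1)

def Spec_iterateHash (bytearray : List Int) (index : Int) (delta : Int) (out : List Int) : Prop := out = iterateHash_alt bytearray index delta
instance (bytearray : List Int) (index : Int) (delta : Int) (out : List Int) : Decidable (Spec_iterateHash bytearray index delta out) := by unfold Spec_iterateHash; infer_instance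

-- ===== CLAIM (what is proved, stated in full; the proofs are below) =====
def Claim_equal_iterateHash : Prop := ∀ (bytearray : List Int) (index : Int) (delta : Int), Dom_iterateHash bytearray index delta → Pre_iterateHash bytearray index delta → Spec_iterateHash bytearray index delta (iterateHash bytearray index delta)

-- ===== LEMMAS AND PROOFS =====

-- the two programs agree on every input (even out-of-range, where both ports return the list unchanged)
theorem iterateHash_eq_loop : ∀ (n : Nat) (ba : List Int) (i d : Int), i.toNat = n →
    iterateHash ba i d = iterLoop ba i d := by
  intro n
  induction n with
  | zero =>
    intro ba i d hn
    rw [iterateHash, iterLoop]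
    cases h : PySem.List.pyGet? ba i with
    | none => rfl
    | some v =>
      simp only [iterStep]
      have hi : i ≤ 0 := by omega
      rw [show (256:Int) + (v + d) = v + d + 256 from by ring]
      split_ifs with h1 h2 h3 h4 h5 <;> simp_all <;> omega
  | succ n ih =>
    intro ba i d hn
    have hi : 0 < i := by omega
    rw [iterateHash, iterLoop]
    cases h : PySem.List.pyGet? ba i with
    | none => rfl
    | some v =>
      simp only [iterStep]
      rw [show (256:Int) + (v + d) = v + d + 256 from by ring]
      have := ih (PySem.List.pySetD ba i (PySem.Int.mod (v + d) 256)) (i - 1) 1 (by omega)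
      have := ih (PySem.List.pySetD ba i ((v + d) + 256)) (i - 1) (-1) (by omega)
      split_ifs with h1 h2 h3 h4 h5 <;> simp_all <;> omega

-- ===== VERDICT (by name: the statement is the Claim_ definition above) =====
theorem iterateHash_spec : Claim_equal_iterateHash := by
  intro ba i d _ _
  unfold Spec_iterateHash iterateHash_alt
  exact iterateHash_eq_loop i.toNat ba i d rfl
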